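-- pv_equiv track=rewrite | github.com/maxime-siegl/runtrack-python | jour04/job08/main.py | nb_ligne
-- ===== SOURCE A (Python) =====
-- def nb_ligne(m, solution):
--     ligne_tab = []
--     while m > 0:
--         if m - 1 == solution:
--             ligne_tab.append('X')
--         else:
--             ligne_tab.append('O')
--
--         m -= 1
--
--     return ligne_tab
-- ===== SOURCE B (Python) =====
-- def nb_ligne(m, solution):
--     # Three-segment concatenation: the row is O-run, one 'X', O-run.
--     if 0 <= solution < m:
--         return ['O'] * (m - 1 - solution) + ['X'] + ['O'] * solution
--     return ['O'] * max(m, 0)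
-- ===== Notes on version B (the rewrite author's own statement) =====
-- stated objective: simpler
-- what changed: Replaces the per-element compare-and-append while loop with a closed-form concatenation of three segments (a run of 'O's, the single 'X', another run of 'O's), with no loop or comparison per element.
import Mathlib
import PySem

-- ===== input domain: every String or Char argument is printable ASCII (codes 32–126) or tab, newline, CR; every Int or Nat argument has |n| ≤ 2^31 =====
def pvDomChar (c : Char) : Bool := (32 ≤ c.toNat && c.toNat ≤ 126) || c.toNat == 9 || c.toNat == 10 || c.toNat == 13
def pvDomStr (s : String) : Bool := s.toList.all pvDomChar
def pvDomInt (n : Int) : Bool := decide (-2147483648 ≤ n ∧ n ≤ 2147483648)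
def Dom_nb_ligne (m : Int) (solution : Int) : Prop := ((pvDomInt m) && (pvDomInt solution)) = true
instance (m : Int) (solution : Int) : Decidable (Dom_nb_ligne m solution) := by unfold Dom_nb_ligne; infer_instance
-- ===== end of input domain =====

-- B builds the row as a closed-form concatenation of three segments (O-run, 'X', O-run) instead of A's per-element compare-and-append loop (objective: simpler).
-- ===== PORT A =====
-- while m > 0: append 'X' or 'O'; m -= 1
def nb_ligne (m : Int) (solution : Int) : List String :=
  if _h : m > 0 then
    (if m - 1 == solution then "X" else "O") :: nb_ligne (m - 1) solution
  else []
termination_by m.toNat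
decreasing_by omega

-- ===== PORT B =====
def nb_ligne_alt (m : Int) (solution : Int) : List String :=
  if 0 ≤ solution ∧ solution < m then
    List.replicate (m - 1 - solution).toNat "O" ++ ["X"] ++ List.replicate solution.toNat "O"
  else
    List.replicate (max m 0).toNat "O"

-- ===== PRECONDITION & SPEC =====
def Spec_nb_ligne (m : Int) (solution : Int) (out : List String) : Prop := out = nb_ligne_alt m solution
instance (m : Int) (solution : Int) (out : List String) : Decidable (Spec_nb_ligne m solution out) := by unfold Spec_nb_ligne; infer_instance

-- ===== CLAIM =====
def Claim_equal_nb_ligne : Prop := ∀ (m : Int) (solution : Int), Dom_nb_ligne m solution → Spec_nb_ligne m solution (nb_ligne m solution)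

-- ===== LEMMAS AND PROOFS =====

theorem nb_ligne_eq_alt_nat (n : Nat) (solution : Int) :
    nb_ligne (n : Int) solution = nb_ligne_alt (n : Int) solution := by
  induction n with
  | zero =>
    rw [nb_ligne, nb_ligne_alt]
    rw [dif_neg (by omega : ¬ ((0:Nat):Int) > 0)]
    rw [if_neg (by omega : ¬ (0 ≤ solution ∧ solution < ((0:Nat):Int)))]
    simp
  | succ k ih =>
    have hstep : nb_ligne ((k:Int) + 1) solution
        = (if ((k:Int) + 1 - 1) == solution then "X" else "O") :: nb_ligne ((k:Int) + 1 - 1) solution := by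
      rw [nb_ligne, dif_pos (by omega : (k:Int) + 1 > 0)]
    push_cast
    rw [hstep]
    have hk1 : (k:Int) + 1 - 1 = (k:Int) := by ring
    rw [hk1, ih]
    rw [nb_ligne_alt, nb_ligne_alt]
    by_cases hs : (k:Int) = solution
    · subst hs
      rw [if_pos (by simp : (((k:Int)) == (k:Int)) = true)]
      rw [if_neg (by omega : ¬ (0 ≤ (k:Int) ∧ (k:Int) < (k:Int)))]
      rw [if_pos (by omega : (0:Int) ≤ (k:Int) ∧ (k:Int) < (k:Int) + 1)]
      have h1 : ((k:Int) + 1 - 1 - (k:Int)).toNat = 0 := by omega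
      have h2 : ((k:Int)).toNat = k := by omega
      have h3 : (max (k:Int) 0).toNat = k := by omega
      rw [h1, h2, h3]
      simp
    · rw [if_neg (by simpa using hs)]
      by_cases hr : 0 ≤ solution ∧ solution < (k : Int)
      · rw [if_pos hr, if_pos (by omega : 0 ≤ solution ∧ solution < (k:Int) + 1)]
        have hidx : ((k:Int) + 1 - 1 - solution).toNat = ((k:Int) - 1 - solution).toNat + 1 := by omega
        rw [hidx, List.replicate_succ]
        simp
      · rw [if_neg hr, if_neg (by omega : ¬ (0 ≤ solution ∧ solution < (k:Int) + 1))]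
        have h1 : (max ((k:Int) + 1) 0).toNat = (max (k:Int) 0).toNat + 1 := by omega
        rw [h1, List.replicate_succ]

-- ===== VERDICT =====
theorem nb_ligne_spec : Claim_equal_nb_ligne := by
  intro m solution _hd
  unfold Spec_nb_ligne
  by_cases hm : 0 ≤ m
  · obtain ⟨n, rfl⟩ := Int.eq_ofNat_of_zero_le hm
    exact nb_ligne_eq_alt_nat n solution
  · rw [nb_ligne, nb_ligne_alt]
    rw [dif_neg (by omega : ¬ m > 0)]
    rw [if_neg (by omega : ¬ (0 ≤ solution ∧ solution < m))]
    have : (max m 0).toNat = 0 := by omega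
    rw [this]; rfl
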